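-- pv_equiv track=rewrite | github.com/senjoyee/az-chatbot01 | backend/utils/helpers.py | escape_odata_filter_value
-- ===== SOURCE A (Python) =====
-- def escape_odata_filter_value(value: str) -> str:
--     """
--     Escape a string value for use in OData filter expressions.
--     Handles special characters and follows OData string literal rules.
--     """
--     if not value:
--         return value
--
--     # First, escape single quotes (OData uses two single quotes for escaping)
--     value = value.replace("'", "''")
--
--     # List of characters that might need to be percent-encoded
--     # Order matters: encode % first to prevent double-encoding
--     value = value.replace("%", "%25")  # Encode % first
--     special_chars = {
--         '#': '%23',
--         '+': '%2B',
--         '?': '%3F',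
--         '\\': '%5C',
--         '&': '%26'
--     }
--
--     # Replace special characters with their percent-encoded values
--     for char, encoded in special_chars.items():
--         value = value.replace(char, encoded)
--
--     return value
-- ===== SOURCE B (Python) =====
-- # Single-pass translation table instead of seven sequential .replace scans.
-- # Equivalent because no replacement output contains a character that is itself a table key
-- # in a later pass of A.
-- _TABLE = {
--     ord("'"): "''",
--     ord('%'): '%25',
--     ord('#'): '%23',
--     ord('+'): '%2B',
--     ord('?'): '%3F',
--     ord('\\'): '%5C',
--     ord('&'): '%26',
-- }
--
-- def escape_odata_filter_value(value: str) -> str: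
--     return value.translate(_TABLE)
-- ===== Notes on version B (the rewrite author's own statement) =====
-- stated objective: idiomatic
-- what changed: Replaces seven sequential str.replace scans (plus an emptiness guard) with one str.translate pass over a single ordinal-keyed table; valid because no replacement output contains a later table key.
import Mathlib
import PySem

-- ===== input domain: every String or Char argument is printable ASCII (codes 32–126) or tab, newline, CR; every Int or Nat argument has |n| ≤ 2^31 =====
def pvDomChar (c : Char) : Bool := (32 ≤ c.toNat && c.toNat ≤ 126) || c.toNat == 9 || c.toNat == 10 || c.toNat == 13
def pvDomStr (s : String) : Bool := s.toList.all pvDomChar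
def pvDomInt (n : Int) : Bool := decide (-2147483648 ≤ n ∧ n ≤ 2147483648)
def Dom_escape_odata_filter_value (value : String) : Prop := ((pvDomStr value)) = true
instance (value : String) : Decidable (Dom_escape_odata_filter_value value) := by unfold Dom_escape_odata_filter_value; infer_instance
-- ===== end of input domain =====

-- B replaces A's seven sequential replace scans with one single-pass per-character translation table (idiomatic, one pass).


-- ===== PORT A =====
-- literal port: emptiness guard, then "'"→"''", then "%"→"%25", then a fold over the dict's pairs
def escape_odata_filter_value (value : String) : String :=
  if value = "" then value
  else
    let v1 := PySem.Str.replace value "'" "''"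
    let v2 := PySem.Str.replace v1 "%" "%25"
    let specialChars : List (String × String) :=
      [("#", "%23"), ("+", "%2B"), ("?", "%3F"), ("\\", "%5C"), ("&", "%26")]
    specialChars.foldl (fun v p => PySem.Str.replace v p.1 p.2) v2

-- ===== PORT B =====
-- the translation table: one output per character, identity elsewhere
def escTrans (c : Char) : List Char :=
  if c = '\'' then ['\'', '\'']
  else if c = '%' then ['%', '2', '5']
  else if c = '#' then ['%', '2', '3']
  else if c = '+' then ['%', '2', 'B']
  else if c = '?' then ['%', '3', 'F']
  else if c = '\\' then ['%', '5', 'C']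
  else if c = '&' then ['%', '2', '6']
  else [c]

def escape_odata_filter_value_alt (value : String) : String :=
  String.ofList (value.toList.flatMap escTrans)

-- ===== PRECONDITION & SPEC =====
def Spec_escape_odata_filter_value (value : String) (out : String) : Prop := out = escape_odata_filter_value_alt value
instance (value : String) (out : String) : Decidable (Spec_escape_odata_filter_value value out) := by unfold Spec_escape_odata_filter_value; infer_instance

-- ===== CLAIM (what is proved, stated in full; the proofs are below) =====
def Claim_equal_escape_odata_filter_value : Prop := ∀ (value : String), Dom_escape_odata_filter_value value → Spec_escape_odata_filter_value value (escape_odata_filter_value value)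

-- ===== LEMMAS AND PROOFS =====
-- single-character replace is a flatMap
theorem replace_go_single (c : Char) (new : List Char) :
    ∀ (l acc : List Char) (fuel : Nat), l.length ≤ fuel →
      PySem.Chars.replace.go [c] new fuel l acc
        = acc.reverse ++ l.flatMap (fun x => if x = c then new else [x]) := by
  intro l
  induction l with
  | nil =>
    intro acc fuel _
    cases fuel <;> simp [PySem.Chars.replace.go]
  | cons x t ih =>
    intro acc fuel hf
    cases fuel with
    | zero => simp at hf
    | succ n =>
      by_cases hx : x = c
      · subst hx
        simp [PySem.Chars.replace.go, List.isPrefixOf, ih (new.reverse ++ acc) n (by simpa using hf)]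
      · simp [PySem.Chars.replace.go, List.isPrefixOf, hx, Ne.symm hx,
          ih (x :: acc) n (by simpa using hf)]

theorem replace_single (s : List Char) (c : Char) (new : List Char) :
    PySem.Chars.replace s [c] new = s.flatMap (fun x => if x = c then new else [x]) := by
  simp [PySem.Chars.replace, replace_go_single c new s [] s.length (le_refl _)]

theorem str_replace_single (s : String) (c : Char) (new : String) :
    (PySem.Str.replace s (String.ofList [c]) new).toList
      = s.toList.flatMap (fun x => if x = c then new.toList else [x]) := by
  simp [PySem.Str.replace, String.toList_ofList, replace_single]

-- the pointwise composition of A's seven single-character passes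
theorem compose_pointwise (x : Char) :
    List.flatMap
      (fun x2 => List.flatMap
        (fun x3 => List.flatMap
          (fun x4 => List.flatMap
            (fun x5 => List.flatMap
              (fun x6 => List.flatMap (fun x7 => if x7 = '&' then ['%','2','6'] else [x7])
                (if x6 = '\\' then ['%','5','C'] else [x6]))
              (if x5 = '?' then ['%','3','F'] else [x5]))
            (if x4 = '+' then ['%','2','B'] else [x4]))
          (if x3 = '#' then ['%','2','3'] else [x3]))
        (if x2 = '%' then ['%','2','5'] else [x2]))
      (if x = '\'' then ['\'', '\''] else [x])
      = escTrans x := by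
  by_cases h1 : x = '\'' <;> by_cases h2 : x = '%' <;> by_cases h3 : x = '#' <;>
    by_cases h4 : x = '+' <;> by_cases h5 : x = '?' <;> by_cases h6 : x = '\\' <;>
    by_cases h7 : x = '&' <;>
  simp_all [escTrans]

-- ===== VERDICT (by name: the statement is the Claim_ definition above) =====
theorem escape_odata_filter_value_spec : Claim_equal_escape_odata_filter_value := by
  intro value _
  unfold Spec_escape_odata_filter_value escape_odata_filter_value escape_odata_filter_value_alt
  by_cases hv : value = ""
  · subst hv; decide
  · simp only [hv, if_false, List.foldl]
    apply String.toList_injective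
    have h1 := str_replace_single value '\'' "''"
    simp only [show ("'" : String) = String.ofList ['\''] from rfl,
      show ("%" : String) = String.ofList ['%'] from rfl,
      show ("#" : String) = String.ofList ['#'] from rfl,
      show ("+" : String) = String.ofList ['+'] from rfl,
      show ("?" : String) = String.ofList ['?'] from rfl,
      show ("\\" : String) = String.ofList ['\\'] from rfl,
      show ("&" : String) = String.ofList ['&'] from rfl]
    simp only [str_replace_single]
    simp only [List.flatMap_assoc]
    simp only [show ("''" : String).toList = ['\'', '\''] from rfl,
      show ("%25" : String).toList = ['%','2','5'] from rfl,
      show ("%23" : String).toList = ['%','2','3'] from rfl,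
      show ("%2B" : String).toList = ['%','2','B'] from rfl,
      show ("%3F" : String).toList = ['%','3','F'] from rfl,
      show ("%5C" : String).toList = ['%','5','C'] from rfl,
      show ("%26" : String).toList = ['%','2','6'] from rfl]
    simp [compose_pointwise]
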